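-- pv_equiv track=rewrite | github.com/315025222/TallerDeHerramientasComputacionales | Clases/Programas/Tarea07/problema07.py | diferenciaPyN
-- ===== SOURCE A (Python) =====
-- def diferenciaPyN(l):  # hace la diferencia de números positivos menos números negativos, si el resultado es positivo,
--     # hay más positivos, si es negativo hay más negativos y si es cero el número de positivos y de negativos es el mismo
--     a = 0
--     b = 0
--     for i in l:
--         if i > 0:
--             a += 1
--         else:
--             a -= 1
--     return a + b
-- ===== SOURCE B (Python) =====
-- def diferenciaPyN(l):
--     # Sort, then binary-search the boundary between non-positives and positives:
--     # lo ends as the number of elements <= 0; answer is (n - lo) - lo = n - 2*lo.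
--     s = sorted(l)
--     lo = 0
--     hi = len(s)
--     while lo < hi:
--         mid = (lo + hi) // 2
--         if s[mid] > 0:
--             hi = mid
--         else:
--             lo = mid + 1
--     return len(s) - 2 * lo
-- ===== Notes on version B (the rewrite author's own statement) =====
-- stated objective: alternative
-- what changed: B sorts the list and binary-searches the boundary index between non-positives and positives (a hand-written bisect_right for 0, since A imports nothing), returning n - 2*boundary; A makes one counting pass with a +1/-1 accumulator.
import Mathlib
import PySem

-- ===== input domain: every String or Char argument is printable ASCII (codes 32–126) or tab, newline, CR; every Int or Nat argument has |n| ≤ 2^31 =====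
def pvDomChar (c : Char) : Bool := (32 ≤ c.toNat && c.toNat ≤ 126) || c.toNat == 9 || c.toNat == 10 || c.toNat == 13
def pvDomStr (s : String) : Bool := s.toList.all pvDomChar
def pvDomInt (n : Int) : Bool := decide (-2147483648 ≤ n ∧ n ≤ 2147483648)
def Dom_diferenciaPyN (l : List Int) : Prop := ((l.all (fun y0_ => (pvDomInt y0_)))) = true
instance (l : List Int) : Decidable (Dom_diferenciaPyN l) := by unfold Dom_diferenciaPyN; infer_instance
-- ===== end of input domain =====

-- B replaces A's +1/-1 counting loop with a different algorithm: sort the list and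
-- binary-search the boundary index between non-positives and positives (alternative).

-- ===== PORT A =====
-- A keeps counters a, b; b stays 0, a gets +1 for i > 0 else -1; returns a + b.
def diferenciaPyN (l : List Int) : Int :=
  let (a, b) := l.foldl (fun (st : Int × Int) i =>
    if i > 0 then (st.1 + 1, st.2) else (st.1 - 1, st.2)) (0, 0)
  a + b

-- ===== PORT B =====
-- B's while-loop binary search; lo, hi are Python ints that stay in [0, len(s)], so Nat
-- indices are exact here and '(lo+hi)//2' is Nat division; s[mid] with 0 ≤ mid < len(s)
-- is exactly s.getD mid 0.
def pvBsearch (s : List Int) (lo hi : Nat) : Nat :=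
  if _h : lo < hi then
    let mid := (lo + hi) / 2
    if s.getD mid 0 > 0 then pvBsearch s lo mid else pvBsearch s (mid + 1) hi
  else lo
termination_by hi - lo
decreasing_by all_goals omega

-- s = sorted(l); lo = pvBsearch s 0 len(s); return len(s) - 2*lo
def diferenciaPyN_alt (l : List Int) : Int :=
  let s := PySem.List.sorted l (fun x => x) false
  let lo := pvBsearch s 0 s.length
  (s.length : Int) - 2 * (lo : Int)

-- ===== PRECONDITION & SPEC =====
def Spec_diferenciaPyN (l : List Int) (out : Int) : Prop := out = diferenciaPyN_alt l
instance (l : List Int) (out : Int) : Decidable (Spec_diferenciaPyN l out) := by unfold Spec_diferenciaPyN; infer_instance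

-- ===== CLAIM (what is proved, stated in full; the proofs are below) =====
def Claim_equal_diferenciaPyN : Prop := ∀ (l : List Int), Dom_diferenciaPyN l → Spec_diferenciaPyN l (diferenciaPyN l)

-- ===== LEMMAS AND PROOFS =====

-- A's fold computes 2·(#positives) − length.
theorem diferenciaPyN_foldl_inv (l : List Int) (a b : Int) :
    l.foldl (fun (st : Int × Int) i =>
      if i > 0 then (st.1 + 1, st.2) else (st.1 - 1, st.2)) (a, b)
    = (a + 2 * (l.countP (fun x => decide (x > 0)) : Int) - (l.length : Int), b) := by
  induction l generalizing a with
  | nil => simp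
  | cons x xs ih =>
    by_cases hx : x > 0 <;>
      simp [List.foldl_cons, hx, ih] <;> ring_nf

-- Binary-search invariant: on a ≤-sorted list, if everything before lo is ≤ 0 and
-- everything from hi on is > 0, the result k keeps both properties (and k ≤ length).
theorem pvBsearch_inv (s : List Int) (hs : s.Pairwise (· ≤ ·)) :
    ∀ lo hi, lo ≤ hi → hi ≤ s.length →
      (∀ i, i < lo → ¬ s.getD i 0 > 0) →
      (∀ i, hi ≤ i → i < s.length → s.getD i 0 > 0) →
      pvBsearch s lo hi ≤ s.length ∧
      (∀ i, i < pvBsearch s lo hi → ¬ s.getD i 0 > 0) ∧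
      (∀ i, pvBsearch s lo hi ≤ i → i < s.length → s.getD i 0 > 0) := by
  intro lo hi
  induction lo, hi using pvBsearch.induct s with
  | case1 lo hi h mid hmid ih =>
    -- s[mid] > 0 branch: recurse on (lo, mid)
    intro _ hhi hlow hhigh
    rw [pvBsearch, dif_pos h, if_pos hmid]
    have hmlt : mid < hi := by omega
    refine ih (by omega) (by omega) hlow ?_
    intro i hmi hil
    have hml : mid < s.length := by omega
    rcases Nat.eq_or_lt_of_le hmi with heq | hlt
    · simpa [← heq, List.getD_eq_getElem _ _ hml] using hmid
    · have := (List.pairwise_iff_getElem.mp hs) mid i hml hil hlt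
      rw [List.getD_eq_getElem _ _ hml] at hmid
      rw [List.getD_eq_getElem _ _ hil]
      omega
  | case2 lo hi h mid hmid ih =>
    -- s[mid] ≤ 0 branch: recurse on (mid+1, hi)
    intro _ hhi hlow hhigh
    rw [pvBsearch, dif_pos h, if_neg hmid]
    refine ih (by omega) hhi ?_ hhigh
    intro i hi1
    have hml : mid < s.length := by omega
    rcases Nat.lt_or_ge i mid with hlt | hge
    · intro hpos
      have hil : i < s.length := by omega
      have := (List.pairwise_iff_getElem.mp hs) i mid hil hml hlt
      rw [List.getD_eq_getElem _ _ hml] at hmid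
      rw [List.getD_eq_getElem _ _ hil] at hpos
      omega
    · have : i = mid := by omega
      subst this
      exact hmid
  | case3 lo hi h =>
    intro hlh hhi hlow hhigh
    rw [pvBsearch, dif_neg h]
    exact ⟨by omega, hlow, fun i hli hil => hhigh i (by omega) hil⟩

-- A list split at index k into non-positives then positives has exactly length − k positives.
theorem countP_of_split (s : List Int) :
    ∀ k, k ≤ s.length →
      (∀ i, i < k → ¬ s.getD i 0 > 0) →
      (∀ i, k ≤ i → i < s.length → s.getD i 0 > 0) →
      s.countP (fun x => decide (x > 0)) = s.length - k := by
  induction s with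
  | nil => intro k hk _ _; simp_all
  | cons x xs ih =>
    intro k hk hlow hhigh
    cases k with
    | zero =>
      have hall : ∀ y ∈ x :: xs, (fun x => decide (x > 0)) y = true := by
        intro y hy
        obtain ⟨i, hil, rfl⟩ := List.mem_iff_getElem.mp hy
        have := hhigh i (Nat.zero_le _) hil
        rw [List.getD_eq_getElem _ _ hil] at this
        simpa using this
      simp [List.countP_eq_length.mpr hall]
    | succ j =>
      have hx : ¬ x > 0 := by simpa using hlow 0 (Nat.succ_pos j)
      have := ih j (by simpa using hk)
        (fun i hij => by simpa using hlow (i + 1) (by omega))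
        (fun i hji hil => by simpa using hhigh (i + 1) (by omega) (by simpa using hil))
      simp only [List.countP_cons]
      simp [hx, this]

-- ===== VERDICT (by name: the statement is the Claim_ definition above) =====
theorem diferenciaPyN_spec : Claim_equal_diferenciaPyN := by
  intro l _
  unfold Spec_diferenciaPyN diferenciaPyN diferenciaPyN_alt
  set s := PySem.List.sorted l (fun x => x) false with hsdef
  have hperm : s.Perm l := PySem.List.sorted_perm l (fun x => x) false
  have hpw : s.Pairwise (· ≤ ·) := by
    simpa using PySem.List.sorted_pairwise l (fun x => x)
  obtain ⟨hk, hlow, hhigh⟩ :=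
    pvBsearch_inv s hpw 0 s.length (Nat.zero_le _) (le_refl _)
      (fun i hi => absurd hi (Nat.not_lt_zero i))
      (fun i hi hil => absurd hil (by omega))
  have hcount := countP_of_split s (pvBsearch s 0 s.length) hk hlow hhigh
  have hcl : l.countP (fun x => decide (x > 0)) = s.countP (fun x => decide (x > 0)) :=
    (hperm.countP_eq _).symm
  have hlen : s.length = l.length := hperm.length_eq
  rw [diferenciaPyN_foldl_inv]
  simp only [hcl, hcount, hlen]
  have hkl : pvBsearch s 0 s.length ≤ l.length := by omega
  push_cast [Nat.sub_add_cancel, hlen] at *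
  omega
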